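-- pv_equiv track=rewrite | github.com/rr8488/yh_rag_cloud_api | yh_rag_cloud_api/parsers/budget_parser_cloud.py | detect_budget_template
-- ===== SOURCE A (Python) =====
-- def detect_budget_template(csv_content: str) -> str:
--     """
--     Detect which budget template format we're dealing with.
--     """
--     lines = csv_content.split('\n')
--
--     # Check for Chumbaka-style template (standard quarters with explicit year columns)
--     if any('2020' in line and '2021' in line and '2022' in line for line in lines[:50]):
--         return "standard_multi_year"
--
--     # Check for Bajau Laut-style template (6-month periods: Jan-Jun, Jul-Dec)
--     if any('Jan-Jun' in line and 'Jul-Dec' in line for line in lines[:50]):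
--         return "six_month_periods"
--
--     # Check for GSS-style template (academic year quarters)
--     if any(term in line for line in lines[:50] for term in ['Oct-Dec', 'Jan-Mar', 'Apr-Jun', 'Jul-Sep']):
--         return "academic_year"
--
--     # Check for formula-based templates (like Bajau Laut)
--     if any('=2000*24' in line or '=C66' in line for line in lines):
--         return "six_month_periods"
--
--     return "standard_multi_year"  # Default to most common format
-- ===== SOURCE B (Python) =====
-- _LABELS = ["standard_multi_year", "six_month_periods", "academic_year",
--            "six_month_periods", "standard_multi_year"]
--
--
-- def _rank(line):
--     """Smallest rule index (0..2) this line matches in the 50-line window, 4 if none."""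
--     if '2020' in line and '2021' in line and '2022' in line:
--         return 0
--     if 'Jan-Jun' in line and 'Jul-Dec' in line:
--         return 1
--     if 'Oct-Dec' in line or 'Jan-Mar' in line or 'Apr-Jun' in line or 'Jul-Sep' in line:
--         return 2
--     return 4
--
--
-- def detect_budget_template(csv_content: str) -> str:
--     lines = csv_content.split('\n')
--     best = 4
--     for line in lines[:50]:
--         best = min(best, _rank(line))
--     if any('=2000*24' in line or '=C66' in line for line in lines):
--         best = min(best, 3)
--     return _LABELS[best]
-- ===== Notes on version B (the rewrite author's own statement) =====
-- stated objective: alternative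
-- what changed: B reformulates the if-chain as a numeric priority computation: each line is mapped to the smallest rule index it matches, the minimum index over the window (plus index 3 for the formula rule over all lines) is taken, and the answer is looked up in a label table, instead of A's four separate any() guards returned in order.
import Mathlib
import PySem

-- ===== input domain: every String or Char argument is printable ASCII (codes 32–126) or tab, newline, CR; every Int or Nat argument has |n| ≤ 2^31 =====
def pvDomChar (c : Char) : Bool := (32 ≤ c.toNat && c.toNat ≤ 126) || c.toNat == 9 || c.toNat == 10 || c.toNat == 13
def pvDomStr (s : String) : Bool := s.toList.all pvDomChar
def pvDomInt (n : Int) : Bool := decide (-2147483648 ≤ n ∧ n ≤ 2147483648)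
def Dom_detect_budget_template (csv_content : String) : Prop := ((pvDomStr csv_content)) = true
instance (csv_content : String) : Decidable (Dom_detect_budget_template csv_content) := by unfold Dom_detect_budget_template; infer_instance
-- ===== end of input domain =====

-- B is a priority-rank reformulation: minimum matched rule index + a label table, instead of A's guard chain.

-- ===== PORT A =====
def detect_budget_template (csv_content : String) : String :=
  let lines := (PySem.Str.split? csv_content "\n").getD []
  if (PySem.List.slice lines none (some 50)).any
      (fun line => PySem.Str.isIn "2020" line && PySem.Str.isIn "2021" line && PySem.Str.isIn "2022" line) then
    "standard_multi_year"
  else if (PySem.List.slice lines none (some 50)).any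
      (fun line => PySem.Str.isIn "Jan-Jun" line && PySem.Str.isIn "Jul-Dec" line) then
    "six_month_periods"
  else if (PySem.List.slice lines none (some 50)).any
      (fun line => (["Oct-Dec", "Jan-Mar", "Apr-Jun", "Jul-Sep"] : List String).any
        (fun term => PySem.Str.isIn term line)) then
    "academic_year"
  else if lines.any (fun line => PySem.Str.isIn "=2000*24" line || PySem.Str.isIn "=C66" line) then
    "six_month_periods"
  else
    "standard_multi_year"

-- ===== PORT B =====
def pvLabels : List String :=
  ["standard_multi_year", "six_month_periods", "academic_year",
   "six_month_periods", "standard_multi_year"]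

def pvRank (line : String) : Nat :=
  if PySem.Str.isIn "2020" line && PySem.Str.isIn "2021" line && PySem.Str.isIn "2022" line then 0
  else if PySem.Str.isIn "Jan-Jun" line && PySem.Str.isIn "Jul-Dec" line then 1
  else if PySem.Str.isIn "Oct-Dec" line || PySem.Str.isIn "Jan-Mar" line
       || PySem.Str.isIn "Apr-Jun" line || PySem.Str.isIn "Jul-Sep" line then 2
  else 4

def detect_budget_template_alt (csv_content : String) : String :=
  let lines := (PySem.Str.split? csv_content "\n").getD []
  let best := (PySem.List.slice lines none (some 50)).foldl (fun b line => min b (pvRank line)) 4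
  let best := if lines.any (fun line => PySem.Str.isIn "=2000*24" line || PySem.Str.isIn "=C66" line)
              then min best 3 else best
  pvLabels.getD best "standard_multi_year"

-- ===== PRECONDITION & SPEC =====
def Spec_detect_budget_template (csv_content : String) (out : String) : Prop := out = detect_budget_template_alt csv_content
instance (csv_content : String) (out : String) : Decidable (Spec_detect_budget_template csv_content out) := by unfold Spec_detect_budget_template; infer_instance

-- ===== CLAIM (what is proved, stated in full; the proofs are below) =====
def Claim_equal_detect_budget_template : Prop := ∀ (csv_content : String), Dom_detect_budget_template csv_content → Spec_detect_budget_template csv_content (detect_budget_template csv_content)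

-- ===== LEMMAS AND PROOFS =====

-- A's term-list any over the four quarter terms equals B's flat disjunction
theorem any_terms_eq (line : String) :
    ((["Oct-Dec", "Jan-Mar", "Apr-Jun", "Jul-Sep"] : List String).any
        (fun term => PySem.Str.isIn term line))
    = (PySem.Str.isIn "Oct-Dec" line || PySem.Str.isIn "Jan-Mar" line
       || PySem.Str.isIn "Apr-Jun" line || PySem.Str.isIn "Jul-Sep" line) := by
  simp [Bool.or_assoc]

-- the minimum rank over a list equals the first-match chain value, dampened by the accumulator
theorem foldl_min_rank (xs : List String) (a : Nat) (h : a ≤ 4) :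
    xs.foldl (fun b line => min b (pvRank line)) a
    = min a (if xs.any (fun line => PySem.Str.isIn "2020" line && PySem.Str.isIn "2021" line && PySem.Str.isIn "2022" line) then 0
        else if xs.any (fun line => PySem.Str.isIn "Jan-Jun" line && PySem.Str.isIn "Jul-Dec" line) then 1
        else if xs.any (fun line => PySem.Str.isIn "Oct-Dec" line || PySem.Str.isIn "Jan-Mar" line
            || PySem.Str.isIn "Apr-Jun" line || PySem.Str.isIn "Jul-Sep" line) then 2
        else 4) := by
  induction xs generalizing a with
  | nil => simp; omega
  | cons x xs ih =>
    simp only [List.foldl_cons, List.any_cons]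
    rw [ih (min a (pvRank x)) (by unfold pvRank; split_ifs <;> omega)]
    unfold pvRank
    rcases Bool.dichotomy (PySem.Str.isIn "2020" x && PySem.Str.isIn "2021" x && PySem.Str.isIn "2022" x) with hc0 | hc0 <;>
    rcases Bool.dichotomy (PySem.Str.isIn "Jan-Jun" x && PySem.Str.isIn "Jul-Dec" x) with hc1 | hc1 <;>
    rcases Bool.dichotomy (PySem.Str.isIn "Oct-Dec" x || PySem.Str.isIn "Jan-Mar" x
        || PySem.Str.isIn "Apr-Jun" x || PySem.Str.isIn "Jul-Sep" x) with hc2 | hc2 <;>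
    simp only [hc0, hc1, hc2] <;>
    simp only [Bool.true_or, Bool.false_or, if_true, if_false, Bool.false_eq_true] <;>
    split_ifs <;> omega

-- ===== VERDICT (by name: the statement is the Claim_ definition above) =====
theorem detect_budget_template_spec : Claim_equal_detect_budget_template := by
  intro csv _
  unfold Spec_detect_budget_template detect_budget_template detect_budget_template_alt
  simp only [any_terms_eq]
  set L := (PySem.Str.split? csv "\n").getD [] with hL
  set s := PySem.List.slice L none (some 50) with hs
  rw [foldl_min_rank s 4 (by omega)]
  rcases Bool.dichotomy (s.any (fun line => PySem.Str.isIn "2020" line && PySem.Str.isIn "2021" line && PySem.Str.isIn "2022" line)) with h0 | h0 <;>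
  rcases Bool.dichotomy (s.any (fun line => PySem.Str.isIn "Jan-Jun" line && PySem.Str.isIn "Jul-Dec" line)) with h1 | h1 <;>
  rcases Bool.dichotomy (s.any (fun line => PySem.Str.isIn "Oct-Dec" line || PySem.Str.isIn "Jan-Mar" line
      || PySem.Str.isIn "Apr-Jun" line || PySem.Str.isIn "Jul-Sep" line)) with h2 | h2 <;>
  rcases Bool.dichotomy (L.any (fun line => PySem.Str.isIn "=2000*24" line || PySem.Str.isIn "=C66" line)) with hf | hf <;>
  simp only [h0, h1, h2, hf, if_true, if_false, Bool.false_eq_true] <;>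
  norm_num [pvLabels]
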